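-- pv_equiv track=rewrite | github.com/struggling-student/PythonExercises | Esami/2024-2025/SYM1-TEL/program.andrea.py | func6
-- ===== SOURCE A (Python) =====
-- def func6(text : str) -> dict[str,int]:
--     pass
--     parole = text.lower().split()
--     iniziali = set(p[0] for p in parole)
--     D = dict.fromkeys(iniziali,0)
--     for p in parole:
--         for c in iniziali:
--             if c in p:
--                 D[c] += 1
--     return D
-- ===== SOURCE B (Python) =====
-- def func6(text: str) -> dict[str, int]:
--     parole = text.lower().split()
--     cnt = {}
--     for p in parole:
--         for c in set(p):
--             cnt[c] = cnt.get(c, 0) + 1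
--     return {p[0]: cnt[p[0]] for p in parole}
-- ===== Notes on version B (the rewrite author's own statement) =====
-- stated objective: simpler
-- what changed: Replaces the nested loop over words x initials (substring test per pair) with a one-pass tally of each word's distinct characters into a counter, then reads off the count of each initial at the end.
import Mathlib
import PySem

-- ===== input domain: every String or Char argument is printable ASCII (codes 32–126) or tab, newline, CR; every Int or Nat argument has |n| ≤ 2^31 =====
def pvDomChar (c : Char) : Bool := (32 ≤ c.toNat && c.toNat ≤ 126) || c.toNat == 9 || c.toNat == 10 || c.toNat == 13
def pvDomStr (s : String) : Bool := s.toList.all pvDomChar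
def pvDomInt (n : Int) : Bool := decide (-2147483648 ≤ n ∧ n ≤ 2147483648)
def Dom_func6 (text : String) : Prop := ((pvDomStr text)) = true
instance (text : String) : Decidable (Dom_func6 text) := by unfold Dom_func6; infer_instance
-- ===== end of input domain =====

-- B replaces A's nested word x initial substring loop by a one-pass tally of each
-- word's distinct characters, read off at the initials at the end (objective: simpler).


-- p[0] as a length-1 Python string; none (IndexError) only for an empty word, which
-- str.split never produces, so the filterMap below drops nothing on reachable inputs.
def pvFirst? (p : String) : Option String := (PySem.Str.pyGet? p 0).map (fun c => String.ofList [c])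

-- ===== PORT A =====
-- Note: the returned dict's ITEM order follows the Set's first-insertion order (Python's
-- set hash order is not modelled); the key→value mapping itself is order-independent,
-- and dict outputs are compared ignoring order.
def func6 (text : String) : List (String × Int) :=
  let parole := PySem.Str.split₀ (PySem.Str.lower text)
  let iniziali : PySem.Set String := PySem.Set.ofList (parole.filterMap pvFirst?)
  let D0 : PySem.Dict String Int := iniziali.foldl (fun d c => d.insert c 0) PySem.Dict.empty
  let D := parole.foldl (fun d p =>
      iniziali.foldl (fun d c => if PySem.Str.isIn c p then d.modify c 0 (· + 1) else d) d) D0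
  D.items

-- ===== PORT B =====
def func6_alt (text : String) : List (String × Int) :=
  let parole := PySem.Str.split₀ (PySem.Str.lower text)
  let cnt : PySem.Dict String Int := parole.foldl
      (fun d p => (PySem.Set.ofList (p.toList.map (fun c => String.ofList [c]))).foldl
          (fun d c => d.insert c (d.getD c 0 + 1)) d) PySem.Dict.empty
  let res := parole.foldl (fun r p =>
      match pvFirst? p with
      | some c => r.insert c (cnt.getD c 0)
      | none => r) PySem.Dict.empty
  res.items

-- ===== PRECONDITION & SPEC =====
def Spec_func6 (text : String) (out : List (String × Int)) : Prop := out = func6_alt text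
instance (text : String) (out : List (String × Int)) : Decidable (Spec_func6 text out) := by unfold Spec_func6; infer_instance

-- ===== CLAIM (what is proved, stated in full; the proofs are below) =====
def Claim_equal_func6 : Prop := ∀ (text : String), Dom_func6 text → Spec_func6 text (func6 text)

-- ===== LEMMAS AND PROOFS =====

-- an insert loop whose stored value depends only on the key: lookup afterwards
theorem pv_getD_foldl_insert_val (L : List String) (v : String → Int)
    (d : PySem.Dict String Int) (c : String) :
    ((L.foldl (fun d x => d.insert x (v x)) d).getD c 0)
      = if c ∈ L then v c else d.getD c 0 := by
  induction L generalizing d with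
  | nil => simp
  | cons x L ih =>
      simp only [List.foldl_cons, ih, List.mem_cons]
      by_cases hL : c ∈ L
      · simp [hL]
      · simp [hL, PySem.Dict.getD_insert]
        split_ifs with hx
        · rw [hx]
        · rfl

-- length-1 strings are told apart by their character
theorem pv_ofList_single_inj {a b : Char} (h : String.ofList [a] = String.ofList [b]) :
    a = b := by
  have := congrArg String.toList h; simpa using this

-- singleton-string substring test is character membership
theorem pv_isIn_singleton (ch : Char) (p : String) :
    PySem.Str.isIn (String.ofList [ch]) p = decide (ch ∈ p.toList) := by
  by_cases h : ch ∈ p.toList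
  · simp only [h, decide_true]
    rw [PySem.Str.isIn_iff_infix]
    obtain ⟨l1, l2, hl⟩ := List.append_of_mem h
    exact ⟨l1, l2, by simp [hl]⟩
  · simp only [h, decide_false]
    rw [← Bool.not_eq_true, PySem.Str.isIn_iff_infix]
    intro hinf
    exact h (hinf.mem (by simp))

-- B's counter: its value at key "ch" counts the words containing ch
theorem pv_cnt_getD (P : List String) (ch : Char) :
    ((P.foldl (fun d p => (PySem.Set.ofList (p.toList.map (fun c => String.ofList [c]))).foldl
          (fun d c => d.insert c (d.getD c 0 + 1)) d) PySem.Dict.empty).getD (String.ofList [ch]) 0)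
      = (P.countP (fun p => decide (ch ∈ p.toList)) : Int) := by
  suffices h : ∀ d : PySem.Dict String Int,
      ((P.foldl (fun d p => (PySem.Set.ofList (p.toList.map (fun c => String.ofList [c]))).foldl
          (fun d c => d.insert c (d.getD c 0 + 1)) d) d).getD (String.ofList [ch]) 0)
        = d.getD (String.ofList [ch]) 0 + (P.countP (fun p => decide (ch ∈ p.toList)) : Int) by
    simpa using h PySem.Dict.empty
  induction P with
  | nil => simp
  | cons p P ih =>
      intro d
      simp only [List.foldl_cons, ih, List.countP_cons]
      rw [PySem.Dict.getD_foldl_insert_add_one]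
      have hmem : String.ofList [ch] ∈ PySem.Set.ofList (p.toList.map (fun c => String.ofList [c]))
          ↔ ch ∈ p.toList := by
        rw [PySem.Set.mem_ofList]
        constructor
        · intro h
          obtain ⟨c, hc, hcc⟩ := List.mem_map.mp h
          exact (pv_ofList_single_inj hcc) ▸ hc
        · intro h; exact List.mem_map.mpr ⟨ch, h, rfl⟩
      by_cases h : ch ∈ p.toList
      · have h1 : (PySem.Set.ofList (p.toList.map (fun c => String.ofList [c]))).count
            (String.ofList [ch]) = 1 :=
          List.count_eq_one_of_mem (PySem.Set.nodup_ofList _) (hmem.mpr h)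
        rw [h1]; simp [h]; ring
      · have h0 : (PySem.Set.ofList (p.toList.map (fun c => String.ofList [c]))).count
            (String.ofList [ch]) = 0 :=
          List.count_eq_zero_of_not_mem (fun hc => h (hmem.mp hc))
        rw [h0]; simp [h]

-- A's inner loop over the initials, with the substring test, as a count increment
theorem pv_innerA_getD (I : List String) (hI : I.Nodup) (p : String)
    (d : PySem.Dict String Int) (c : String) (hc : c ∈ I) :
    ((I.foldl (fun d c => if PySem.Str.isIn c p then d.modify c 0 (· + 1) else d) d).getD c 0)
      = d.getD c 0 + (if PySem.Str.isIn c p then 1 else 0) := by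
  rw [PySem.List.foldl_if_eq_foldl_filter, PySem.Dict.getD_foldl_modify_add_one]
  by_cases h : PySem.Str.isIn c p
  · have h1 : (I.filter (fun c => PySem.Str.isIn c p)).count c = 1 :=
      List.count_eq_one_of_mem (hI.filter _) (List.mem_filter.mpr ⟨hc, h⟩)
    rw [h1, if_pos h]; norm_num
  · have h0 : (I.filter (fun c => PySem.Str.isIn c p)).count c = 0 :=
      List.count_eq_zero_of_not_mem (fun hcf => h ((List.mem_filter.mp hcf).2))
    rw [h0, if_neg h]; norm_num

theorem pv_innerA_keys (I : List String) (p : String) (d : PySem.Dict String Int)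
    (hsub : ∀ c ∈ I, c ∈ d.keys) :
    ((I.foldl (fun d c => if PySem.Str.isIn c p then d.modify c 0 (· + 1) else d) d).keys)
      = d.keys := by
  rw [PySem.List.foldl_if_eq_foldl_filter, PySem.Dict.keys_foldl_modify,
    PySem.Set.update_eq_append_filter]
  have hnil : (PySem.Set.ofList (I.filter fun c => PySem.Str.isIn c p)).filter
      (fun y => !PySem.Set.contains d.keys y) = [] := by
    rw [List.filter_eq_nil_iff]
    intro a ha
    have haI : a ∈ I :=
      (List.mem_filter.mp ((PySem.Set.mem_ofList _ _).mp ha)).1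
    simpa using hsub _ haI
  rw [hnil, List.append_nil]

-- A's outer loop: keys stay the initials, value at each initial counts containing words
theorem pv_outerA (I : List String) (hI : I.Nodup) (P : List String)
    (d : PySem.Dict String Int) (hk : d.keys = I) :
    ((P.foldl (fun d p =>
        I.foldl (fun d c => if PySem.Str.isIn c p then d.modify c 0 (· + 1) else d) d) d).keys = I)
    ∧ ∀ c ∈ I, ((P.foldl (fun d p =>
        I.foldl (fun d c => if PySem.Str.isIn c p then d.modify c 0 (· + 1) else d) d) d).getD c 0)
      = d.getD c 0 + (P.countP (fun p => PySem.Str.isIn c p) : Int) := by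
  induction P generalizing d with
  | nil => simpa using hk
  | cons p P ih =>
      have hkeys1 : ((I.foldl (fun d c => if PySem.Str.isIn c p then d.modify c 0 (· + 1) else d) d).keys) = I := by
        rw [pv_innerA_keys I p d (fun c hc => hk ▸ hc), hk]
      obtain ⟨hk2, hv2⟩ := ih _ hkeys1
      refine ⟨by simpa using hk2, fun c hc => ?_⟩
      simp only [List.foldl_cons, List.countP_cons]
      rw [hv2 c hc, pv_innerA_getD I hI p d c hc]
      by_cases h : PySem.Str.isIn c p
      · simp only [if_pos h]; push_cast; ring
      · simp only [if_neg h]; push_cast; ring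

-- B's result loop with the match equals the insert loop over the present initials
theorem pv_resB (P : List String) (v : String → Int) (r : PySem.Dict String Int) :
    (P.foldl (fun r p =>
      match pvFirst? p with
      | some c => r.insert c (v c)
      | none => r) r)
    = ((P.filterMap pvFirst?).foldl (fun r c => r.insert c (v c)) r) := by
  induction P generalizing r with
  | nil => rfl
  | cons p P ih =>
      cases h : pvFirst? p <;> simp [h, ih]

-- every initial is a length-1 string
theorem pv_first_singleton (P : List String) (c : String)
    (hc : c ∈ P.filterMap pvFirst?) : ∃ ch : Char, c = String.ofList [ch] := by
  obtain ⟨p, _, hp⟩ := List.mem_filterMap.mp hc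
  unfold pvFirst? at hp
  obtain ⟨ch, _, h2⟩ := Option.map_eq_some_iff.mp hp
  exact ⟨ch, h2.symm⟩

-- items of an insert loop (value a function of the key) from the empty dict
theorem pv_items_insert_loop (L : List String) (v : String → Int) :
    ((L.foldl (fun r c => r.insert c (v c)) PySem.Dict.empty).items)
      = (PySem.Set.ofList L).map (fun c => (c, v c)) := by
  have hkeys : ((L.foldl (fun r c => r.insert c (v c)) PySem.Dict.empty).keys)
      = PySem.Set.ofList L := by
    rw [PySem.Dict.keys_foldl_insert]
    simpa [PySem.Dict.keys_empty] using PySem.Set.update_nil_left L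
  have hnd : ((L.foldl (fun r c => r.insert c (v c)) PySem.Dict.empty).keys).Nodup := by
    rw [hkeys]; exact PySem.Set.nodup_ofList L
  rw [PySem.Dict.items_eq_map_keys _ hnd 0, hkeys]
  apply List.map_congr_left
  intro c hc
  rw [pv_getD_foldl_insert_val]
  simp [(PySem.Set.mem_ofList _ _).mp hc]

-- ===== VERDICT (by name: the statement is the Claim_ definition above) =====
theorem func6_spec : Claim_equal_func6 := by
  intro text _
  unfold Spec_func6 func6 func6_alt
  simp only []
  set parole := PySem.Str.split₀ (PySem.Str.lower text) with hp
  set I : List String := PySem.Set.ofList (parole.filterMap pvFirst?) with hIdef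
  have hI : I.Nodup := PySem.Set.nodup_ofList _
  have hk0 : ((I.foldl (fun d c => d.insert c 0) (PySem.Dict.empty : PySem.Dict String Int)).keys) = I := by
    rw [PySem.Dict.keys_foldl_insert, PySem.Dict.keys_empty, PySem.Set.update_nil_left]
    exact PySem.Set.ofList_eq_self_of_nodup _ hI
  obtain ⟨hkA, hvA⟩ := pv_outerA I hI parole _ hk0
  rw [PySem.Dict.items_eq_map_keys _ (by rw [hkA]; exact hI) 0, hkA]
  rw [pv_resB, pv_items_insert_loop, ← hIdef]
  apply List.map_congr_left
  intro c hc
  have hc' : c ∈ parole.filterMap pvFirst? := (PySem.Set.mem_ofList _ _).mp (hIdef ▸ hc)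
  obtain ⟨ch, rfl⟩ := pv_first_singleton parole c hc'
  simp only [Prod.mk.injEq, true_and]
  rw [hvA _ hc]
  rw [pv_getD_foldl_insert_val I (fun _ => 0) PySem.Dict.empty (String.ofList [ch]),
    if_pos hc, pv_cnt_getD]
  have hcount : parole.countP (fun p => PySem.Str.isIn (String.ofList [ch]) p)
      = parole.countP (fun p => decide (ch ∈ p.toList)) :=
    List.countP_congr (fun p _ => by rw [pv_isIn_singleton])
  rw [hcount]; ring
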